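-- pv_equiv track=rewrite | github.com/BrianGMcEnery/vedmath-python | notebooks/vedmath/vnumbers.py | _from_vinculum
-- ===== SOURCE A (Python) =====
-- def all_from_9_last_from_10(ds):
--     '''Apply the sutra to a list of digits'''
--     def all_from_9(d):
--         return 9 - d
--     def last_from_10(d):
--         return 10 - d
--
--     ans = [all_from_9(d) for d in ds[:-1]]
--     ans = ans + [last_from_10(ds[-1])]
--     return ans
--
-- def find_truth_changes(truth_values):
--     '''Find out where the truth values change'''
--     changes = [0]
--     current = truth_values[0]
--     try:
--         while True:
--             idx = truth_values.index(not current, changes[-1])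
--             changes.append(idx)
--             current = not current
--     except:
--         return changes
--
-- def negate_digits(ds):
--     '''Negate a list of digits'''
--     return [-d for d in ds]
--
-- def _from_vinculum(ds):
--     '''
--     Returns the digits ds in normal form.
--     '''
--
--     def one_less_than_list(ds):
--         '''Apply one_less_than to the last element of a list'''
--         if ds == [1]:
--             return [0]
--         else:
--             ds[-1] -= 1
--             return ds
--
--     truth_values = [e < 0 for e in ds]
--     change_indxs = find_truth_changes(truth_values)
--
--     ans = []
--     idx = 0
--     try:
--         while True:
--             ci = change_indxs[idx]
--             cip1 = change_indxs[idx+1]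
--             if truth_values[ci]: #the element is < 0
--                 ans += all_from_9_last_from_10(negate_digits(ds[ci:cip1]))
--             else:
--                 ans += one_less_than_list(ds[ci:cip1])
--             idx += 1
--     except:
--         #handle the final change
--         ci = change_indxs[idx]
--         if truth_values[ci]: #the element is < 0
--                 ans += all_from_9_last_from_10(negate_digits(ds[ci:]))
--         else:
--             ans += ds[ci:]
--
--         if ans[0] == 0: #chop leading 0
--             ans = ans[1:]
--         return ans
-- ===== SOURCE B (Python) =====
-- def _from_vinculum(ds):
--     '''
--     Returns the digits ds in normal form.
--     '''
--     # One forward pass using only the right neighbor: no run/segment machinery.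
--     ans = []
--     for d, nxt in zip(ds, ds[1:]):
--         if d < 0:
--             ans.append(10 + d if nxt >= 0 else 9 + d)
--         else:
--             ans.append(d - 1 if nxt < 0 else d)
--     if ds:
--         d = ds[-1]
--         ans.append(10 + d if d < 0 else d)
--     if ans and ans[0] == 0:
--         ans = ans[1:]
--     return ans
-- ===== Notes on version B (the rewrite author's own statement) =====
-- stated objective: simpler
-- what changed: Replaces A's truth-value list + exception-driven change-index search + per-segment complement/decrement helpers with a single forward pass that decides each output digit from the digit and its right neighbor; one pass with no slicing, no repeated index() scans and no exception-driven control flow.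
import Mathlib
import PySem

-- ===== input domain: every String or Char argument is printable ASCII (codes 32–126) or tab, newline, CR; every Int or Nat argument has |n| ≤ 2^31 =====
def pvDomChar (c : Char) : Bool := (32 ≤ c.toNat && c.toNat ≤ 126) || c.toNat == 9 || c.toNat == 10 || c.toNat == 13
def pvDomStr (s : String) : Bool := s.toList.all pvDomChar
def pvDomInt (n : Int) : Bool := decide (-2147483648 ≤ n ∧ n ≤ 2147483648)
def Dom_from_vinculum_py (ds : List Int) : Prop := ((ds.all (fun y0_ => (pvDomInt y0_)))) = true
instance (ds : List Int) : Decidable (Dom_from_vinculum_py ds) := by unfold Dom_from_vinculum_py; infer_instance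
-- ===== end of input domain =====

-- B replaces A's truth-value/segment machinery by one right-neighbor pass (simpler; return value only, A never mutates its argument).

-- ===== PORT A =====
-- all_from_9_last_from_10: map (9 - ·) over ds[:-1], append 10 - ds[-1].
-- (within Pre_ it is only applied to nonempty lists, where getLastD is exactly ds[-1])
def pvAfl (ds : List Int) : List Int :=
  (ds.dropLast.map (fun d => 9 - d)) ++ [10 - ds.getLastD 0]

def pvNegate (ds : List Int) : List Int := ds.map (fun d => -d)

-- one_less_than_list: ds[-1] -= 1 (on a slice copy), special-casing [1] → [0]
def pvOneLess (ds : List Int) : List Int :=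
  if ds = [1] then [0] else ds.dropLast ++ [ds.getLastD 0 - 1]

-- truth_values.index(target, start): first index ≥ start holding target (none = ValueError)
def pvIndexFrom (tv : List Bool) (target : Bool) (start : Nat) : Option Nat :=
  match (tv.drop start).findIdx? (· == target) with
  | some j => some (start + j)
  | none => none

-- find_truth_changes's `while True ... except` loop; fuel only makes the loop total,
-- it never runs out (boundaries strictly increase, so ≤ tv.length iterations happen).
def pvFtcLoop (tv : List Bool) (current : Bool) (changes : List Nat) : Nat → List Nat
  | 0 => changes
  | fuel + 1 =>
    match pvIndexFrom tv (!current) (changes.getLastD 0) with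
    | none => changes
    | some idx => pvFtcLoop tv (!current) (changes ++ [idx]) fuel

def pvFindTruthChanges (tv : List Bool) : List Nat :=
  pvFtcLoop tv (tv.getD 0 false) [0] (tv.length + 1)

-- the `while True` over consecutive change indices; the IndexError on change_indxs[idx+1]
-- becomes the one-element case (change_indxs is nonempty, so [] is unreachable within Pre_).
-- ds[ci:cip1] with 0 ≤ ci ≤ cip1 is exactly (ds.drop ci).take (cip1 - ci).
def pvFvLoop (ds : List Int) (tv : List Bool) : List Nat → List Int
  | [] => []
  | [ci] =>
    if tv.getD ci false then pvAfl (pvNegate (ds.drop ci)) else ds.drop ci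
  | ci :: cip1 :: rest =>
    (if tv.getD ci false then pvAfl (pvNegate ((ds.drop ci).take (cip1 - ci)))
     else pvOneLess ((ds.drop ci).take (cip1 - ci))) ++ pvFvLoop ds tv (cip1 :: rest)

def from_vinculum_py (ds : List Int) : List Int :=
  let tv := ds.map (fun e => decide (e < 0))
  let changes := pvFindTruthChanges tv
  let ans := pvFvLoop ds tv changes
  -- `if ans[0] == 0: ans = ans[1:]`; within Pre_ ans is nonempty (ans[0] never raises)
  match ans with
  | 0 :: t => t
  | other => other

-- ===== PORT B =====
-- one pass, each output digit decided from the digit and its right neighbor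
def pvAltLoop : List Int → List Int
  | [] => []
  | [d] => [if d < 0 then 10 + d else d]
  | d :: e :: rest =>
    (if d < 0 then (if 0 ≤ e then 10 + d else 9 + d)
     else (if e < 0 then d - 1 else d)) :: pvAltLoop (e :: rest)

-- `if ans and ans[0] == 0: ans = ans[1:]` (head? = some 0 is exactly "nonempty and first is 0")
def from_vinculum_py_alt (ds : List Int) : List Int :=
  let ans := pvAltLoop ds
  if ans.head? = some 0 then ans.tail else ans

-- ===== PRECONDITION & SPEC =====
-- A raises IndexError on the empty list (truth_values[0]); it returns on every other input.
def Pre_from_vinculum_py (ds : List Int) : Prop := ds ≠ []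
instance (ds : List Int) : Decidable (Pre_from_vinculum_py ds) := by unfold Pre_from_vinculum_py; infer_instance
def pvWitness_from_vinculum_py : List Int := [2, 0, -3]

def Spec_from_vinculum_py (ds : List Int) (out : List Int) : Prop := out = from_vinculum_py_alt ds
instance (ds : List Int) (out : List Int) : Decidable (Spec_from_vinculum_py ds out) := by unfold Spec_from_vinculum_py; infer_instance

-- ===== CLAIM (what is proved, stated in full; the proofs are below) =====
def Claim_equal_from_vinculum_py : Prop := ∀ (ds : List Int), Dom_from_vinculum_py ds → Pre_from_vinculum_py ds → Spec_from_vinculum_py ds (from_vinculum_py ds)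

-- ===== LEMMAS AND PROOFS =====

-- the change-index list produced by find_truth_changes is a chain of run boundaries
def pvChain (tv : List Bool) : List Nat → Prop
  | [] => True
  | [c] => c < tv.length ∧ ∀ i, c ≤ i → i < tv.length → tv.getD i false = tv.getD c false
  | c :: c' :: rest =>
    c < tv.length ∧ c < c' ∧ (∀ i, c ≤ i → i < c' → tv.getD i false = tv.getD c false) ∧
    tv.getD c' false = !(tv.getD c false) ∧ pvChain tv (c' :: rest)

theorem pvIndexFrom_none {tv : List Bool} {target : Bool} {start : Nat}
    (h : pvIndexFrom tv target start = none) :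
    ∀ i, start ≤ i → i < tv.length → tv.getD i false ≠ target := by
  intro i h1 h2
  unfold pvIndexFrom at h
  cases hf : (tv.drop start).findIdx? (· == target) with
  | some j => rw [hf] at h; exact absurd h (by simp)
  | none =>
    rw [List.findIdx?_eq_none_iff] at hf
    have hj : i - start < (tv.drop start).length := by simp; omega
    have hd := hf ((tv.drop start)[i - start]) (List.getElem_mem hj)
    rw [List.getElem_drop] at hd
    have hi : start + (i - start) = i := by omega
    have hd2 : tv.getD (start + (i - start)) false ≠ target := by
      rw [List.getD_eq_getElem tv false (by omega)]; simpa using hd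
    rw [hi] at hd2
    exact hd2

theorem pvIndexFrom_some {tv : List Bool} {target : Bool} {start idx : Nat}
    (h : pvIndexFrom tv target start = some idx) :
    start ≤ idx ∧ idx < tv.length ∧ tv.getD idx false = target ∧
      ∀ i, start ≤ i → i < idx → tv.getD i false ≠ target := by
  unfold pvIndexFrom at h
  cases hf : (tv.drop start).findIdx? (· == target) with
  | none => rw [hf] at h; exact absurd h (by simp)
  | some j =>
    rw [hf] at h
    have hidx : idx = start + j := by simpa using h.symm
    subst hidx
    rw [List.findIdx?_eq_some_iff_getElem] at hf
    obtain ⟨hj, hpj, hmin⟩ := hf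
    have hlen : start + j < tv.length := by simp at hj; omega
    refine ⟨by omega, hlen, ?_, ?_⟩
    · rw [List.getD_eq_getElem tv false hlen]
      have hd := hpj
      rw [List.getElem_drop] at hd
      simpa using hd
    · intro i hi1 hi2
      have hj' : i - start < j := by omega
      have hd := hmin (i - start) hj'
      rw [List.getElem_drop] at hd
      have hi : start + (i - start) = i := by omega
      have hd2 : tv.getD (start + (i - start)) false ≠ target := by
        rw [List.getD_eq_getElem tv false (by omega)]; simpa using hd
      rw [hi] at hd2
      exact hd2

theorem pvFtcLoop_chain : ∀ (fuel : Nat) (tv : List Bool) (pref : List Nat) (c : Nat),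
    c < tv.length → tv.length - c < fuel →
    ∃ rest, pvFtcLoop tv (tv.getD c false) (pref ++ [c]) fuel = (pref ++ [c]) ++ rest ∧
      pvChain tv (c :: rest) := by
  intro fuel
  induction fuel with
  | zero => intro tv pref c hc hf; omega
  | succ n ih =>
    intro tv pref c hc hf
    simp only [pvFtcLoop, List.getLastD_concat]
    cases hidx : pvIndexFrom tv (!(tv.getD c false)) c with
    | none =>
      refine ⟨[], by simp, hc, fun i h1 h2 => ?_⟩
      have := pvIndexFrom_none hidx i h1 h2
      cases hA : tv.getD i false <;> cases hB : tv.getD c false <;> simp_all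
    | some idx =>
      obtain ⟨h1, h2, h3, h4⟩ := pvIndexFrom_some hidx
      have hlt : c < idx := by
        rcases Nat.lt_or_ge c idx with h | h
        · exact h
        · have hce : c = idx := by omega
          subst hce
          cases tv.getD c false <;> simp_all
      simp only
      have hcur : (!(tv.getD c false)) = tv.getD idx false := h3.symm
      rw [hcur]
      obtain ⟨rest, heq, hch⟩ := ih tv (pref ++ [c]) idx h2 (by omega)
      refine ⟨idx :: rest, by simpa using heq, hc, hlt, fun i hi1 hi2 => ?_, h3, hch⟩
      have := h4 i hi1 hi2
      cases hA : tv.getD i false <;> cases hB : tv.getD c false <;> simp_all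

-- value of the truth-value list at an index
theorem pv_tv_getD (ds : List Int) (i : Nat) (h : i < ds.length) :
    (ds.map (fun e => decide (e < 0))).getD i false = decide (ds[i] < 0) := by
  rw [List.getD_eq_getElem _ false (by simpa using h)]
  simp

theorem pvChain_head_lt {tv : List Bool} {c : Nat} {rest : List Nat}
    (h : pvChain tv (c :: rest)) : c < tv.length := by
  cases rest with
  | nil => exact h.1
  | cons c' r => exact h.1

theorem pvAfl_singleton (x : Int) : pvAfl [x] = [10 - x] := by
  simp [pvAfl]

theorem pvAfl_cons2 (x y : Int) (ys : List Int) :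
    pvAfl (x :: y :: ys) = (9 - x) :: pvAfl (y :: ys) := by
  simp [pvAfl, List.getLastD_eq_getLast?]

theorem pvOneLess_singleton (x : Int) : pvOneLess [x] = [x - 1] := by
  by_cases hx : x = 1 <;> simp [pvOneLess, hx]

theorem pvOneLess_cons2 (x y : Int) (ys : List Int) :
    pvOneLess (x :: y :: ys) = x :: pvOneLess (y :: ys) := by
  by_cases h : y :: ys = [1]
  · rw [h]
    simp [pvOneLess]
  · simp [pvOneLess, h, List.getLastD_eq_getLast?]

theorem pvAlt_allNonneg : ∀ (l : List Int), (∀ x ∈ l, 0 ≤ x) → pvAltLoop l = l := by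
  intro l
  induction l with
  | nil => intro _; rfl
  | cons d t ih =>
    intro hall
    cases t with
    | nil =>
      have hd := hall d (by simp)
      simp [pvAltLoop]
      omega
    | cons e r =>
      have hd := hall d (by simp)
      have he := hall e (by simp)
      rw [pvAltLoop, if_neg (by omega), if_neg (by omega)]
      rw [ih (fun x hx => hall x (by simp [hx]))]

theorem pvAlt_allNeg : ∀ (l : List Int), l ≠ [] → (∀ x ∈ l, x < 0) →
    pvAltLoop l = pvAfl (pvNegate l) := by
  intro l
  induction l with
  | nil => intro h _; exact absurd rfl h
  | cons d t ih =>
    intro _ hall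
    cases t with
    | nil =>
      have hd := hall d (by simp)
      simp only [pvNegate, List.map_cons, List.map_nil, pvAfl_singleton, pvAltLoop]
      rw [if_pos hd]
      congr 1
      omega
    | cons e r =>
      have hd := hall d (by simp)
      have he := hall e (by simp)
      simp only [pvNegate, List.map_cons]
      rw [pvAfl_cons2, pvAltLoop, if_pos hd, if_neg (by omega)]
      have := ih (by simp) (fun x hx => hall x (by simp [hx]))
      simp only [pvNegate, List.map_cons] at this
      rw [this]
      congr 1
      omega

theorem pvAlt_seg_neg : ∀ (s : List Int), s ≠ [] → (∀ x ∈ s, x < 0) →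
    ∀ (e : Int) (r : List Int), 0 ≤ e →
    pvAltLoop (s ++ e :: r) = pvAfl (pvNegate s) ++ pvAltLoop (e :: r) := by
  intro s
  induction s with
  | nil => intro h; exact absurd rfl h
  | cons d t ih =>
    intro _ hall e r he
    cases t with
    | nil =>
      have hd := hall d (by simp)
      simp only [pvNegate, List.map_cons, List.map_nil, pvAfl_singleton,
        List.cons_append, List.nil_append, pvAltLoop]
      rw [if_pos hd, if_pos he]
      congr 2
      omega
    | cons d' t' =>
      have hd := hall d (by simp)
      have hd' := hall d' (by simp)
      simp only [pvNegate, List.map_cons, List.cons_append]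
      rw [pvAfl_cons2, pvAltLoop, if_pos hd, if_neg (by omega)]
      have := ih (by simp) (fun x hx => hall x (by simp [hx])) e r he
      simp only [pvNegate, List.map_cons, List.cons_append] at this
      rw [this]
      simp

theorem pvAlt_seg_nonneg : ∀ (s : List Int), s ≠ [] → (∀ x ∈ s, 0 ≤ x) →
    ∀ (e : Int) (r : List Int), e < 0 →
    pvAltLoop (s ++ e :: r) = pvOneLess s ++ pvAltLoop (e :: r) := by
  intro s
  induction s with
  | nil => intro h; exact absurd rfl h
  | cons d t ih =>
    intro _ hall e r he
    cases t with
    | nil =>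
      have hd := hall d (by simp)
      rw [pvOneLess_singleton]
      simp only [List.cons_append, List.nil_append, pvAltLoop]
      rw [if_neg (by omega), if_pos he]
    | cons d' t' =>
      have hd := hall d (by simp)
      have hd' := hall d' (by simp)
      rw [pvOneLess_cons2]
      simp only [List.cons_append]
      rw [pvAltLoop, if_neg (by omega), if_neg (by omega)]
      have := ih (by simp) (fun x hx => hall x (by simp [hx])) e r he
      simp only [List.cons_append] at this
      rw [this]

theorem pv_main (ds : List Int) : ∀ (rest : List Nat) (c : Nat),
    pvChain (ds.map (fun e => decide (e < 0))) (c :: rest) →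
    pvFvLoop ds (ds.map (fun e => decide (e < 0))) (c :: rest) = pvAltLoop (ds.drop c) := by
  intro rest
  induction rest with
  | nil =>
    intro c hch
    obtain ⟨hc, hconst⟩ := hch
    have hc' : c < ds.length := by simpa using hc
    have hsign : ∀ x ∈ ds.drop c, (decide (x < 0)) = decide (ds[c] < 0) := by
      intro x hx
      rw [List.mem_iff_getElem] at hx
      obtain ⟨j, hj, hx⟩ := hx
      have hj' : c + j < ds.length := by simp at hj; omega
      have := hconst (c + j) (by omega) (by simpa using hj')
      rw [pv_tv_getD ds (c + j) hj', pv_tv_getD ds c hc'] at this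
      rw [← hx, List.getElem_drop]
      exact this
    by_cases h0 : ds[c] < 0
    · rw [pvFvLoop, if_pos (by rw [pv_tv_getD ds c hc']; simpa using h0)]
      rw [pvAlt_allNeg (ds.drop c) (by simp; omega)
        (fun x hx => by have := hsign x hx; simp [h0] at this; exact this)]
    · rw [pvFvLoop, if_neg (by rw [pv_tv_getD ds c hc']; simpa using h0)]
      rw [pvAlt_allNonneg (ds.drop c)
        (fun x hx => by have := hsign x hx; simp [h0] at this; omega)]
  | cons c' rest' ih =>
    intro c hch
    obtain ⟨hc, hlt, hconst, hflip, hch'⟩ := hch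
    have hc' : c < ds.length := by simpa using hc
    have hc1 : c' < ds.length := by simpa using pvChain_head_lt hch'
    have hIH := ih c' hch'
    -- split ds.drop c into the segment s and ds.drop c'
    have hsplit : (ds.drop c).take (c' - c) ++ ds.drop c' = ds.drop c := by
      have h := List.take_append_drop (c' - c) (ds.drop c)
      rw [List.drop_drop] at h
      have hck : c + (c' - c) = c' := by omega
      rw [hck] at h
      exact h
    have hslen : ((ds.drop c).take (c' - c)).length = c' - c := by
      simp
      omega
    have hsne : (ds.drop c).take (c' - c) ≠ [] := by
      intro h
      rw [h] at hslen
      simp at hslen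
      omega
    have hsign : ∀ x ∈ (ds.drop c).take (c' - c), (decide (x < 0)) = decide (ds[c] < 0) := by
      intro x hx
      rw [List.mem_iff_getElem] at hx
      obtain ⟨j, hj, hx⟩ := hx
      rw [hslen] at hj
      have hj' : c + j < ds.length := by omega
      have := hconst (c + j) (by omega) (by omega)
      rw [pv_tv_getD ds (c + j) hj', pv_tv_getD ds c hc'] at this
      rw [← hx, List.getElem_take, List.getElem_drop]
      exact this
    have hfl : decide (ds[c'] < 0) = !decide (ds[c] < 0) := by
      rw [← pv_tv_getD ds c' hc1, ← pv_tv_getD ds c hc']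
      exact hflip
    have hdropc' : ds.drop c' = ds[c'] :: ds.drop (c' + 1) :=
      List.drop_eq_getElem_cons hc1
    by_cases h0 : ds[c] < 0
    · have hnext : 0 ≤ ds[c'] := by simp [h0] at hfl; omega
      rw [pvFvLoop, if_pos (by rw [pv_tv_getD ds c hc']; simpa using h0), hIH, hdropc']
      conv_rhs => rw [← hsplit, hdropc']
      rw [pvAlt_seg_neg _ hsne
        (fun x hx => by have := hsign x hx; simp [h0] at this; exact this)
        _ _ hnext]
    · have hnext : ds[c'] < 0 := by simp [h0] at hfl; exact hfl
      rw [pvFvLoop, if_neg (by rw [pv_tv_getD ds c hc']; simpa using h0), hIH, hdropc']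
      conv_rhs => rw [← hsplit, hdropc']
      rw [pvAlt_seg_nonneg _ hsne
        (fun x hx => by have := hsign x hx; simp [h0] at this; omega)
        _ _ hnext]

-- ===== VERDICT (by name: the statement is the Claim_ definition above) =====
theorem from_vinculum_py_spec : Claim_equal_from_vinculum_py := by
  intro ds _ hpre
  unfold Spec_from_vinculum_py from_vinculum_py from_vinculum_py_alt
  have hlen : 0 < (ds.map (fun e => decide (e < 0))).length := by
    simp
    exact List.length_pos_iff.mpr hpre
  obtain ⟨rest, heq, hch⟩ :=
    pvFtcLoop_chain ((ds.map (fun e => decide (e < 0))).length + 1)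
      (ds.map (fun e => decide (e < 0))) [] 0 hlen (by omega)
  simp only [List.nil_append] at heq
  have hans : pvFvLoop ds (ds.map (fun e => decide (e < 0)))
      (pvFindTruthChanges (ds.map (fun e => decide (e < 0)))) = pvAltLoop ds := by
    rw [pvFindTruthChanges, heq]
    have := pv_main ds rest 0 hch
    simpa using this
  simp only [hans]
  cases hA : pvAltLoop ds with
  | nil => simp
  | cons a t => by_cases h : a = 0 <;> simp [h]
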